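-- pv_equiv track=rewrite | github.com/kanhaiyaa/Basic-Programming-Problems | Day-10/3. abbreviations.py | abbreviations
-- ===== SOURCE A (Python) =====
-- def abbreviations(abbs, words):
--   for abb in abbs:
--
--     count = 0
--     for word in words:
--       if word.startswith(abb):
--         count += 1
--
--     if count != 1: return False
--
--   return True
-- ===== SOURCE B (Python) =====
-- def abbreviations(abbs, words):
--     # Build a count of every non-empty prefix of every word once, then
--     # answer each abbreviation by a single dictionary lookup.
--     counts = {}
--     for word in words:
--         for i in range(1, len(word) + 1):
--             p = word[:i]
--             counts[p] = counts.get(p, 0) + 1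
--     counts[""] = len(words)
--     return all(counts.get(a, 0) == 1 for a in abbs)
-- ===== Notes on version B (the rewrite author's own statement) =====
-- stated objective: alternative
-- what changed: Instead of scanning all words once per abbreviation, B builds a dictionary counting every prefix of every word in one pass over the words and answers each abbreviation with a single lookup; it trades per-abbreviation scans for an upfront prefix index.
import Mathlib
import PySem

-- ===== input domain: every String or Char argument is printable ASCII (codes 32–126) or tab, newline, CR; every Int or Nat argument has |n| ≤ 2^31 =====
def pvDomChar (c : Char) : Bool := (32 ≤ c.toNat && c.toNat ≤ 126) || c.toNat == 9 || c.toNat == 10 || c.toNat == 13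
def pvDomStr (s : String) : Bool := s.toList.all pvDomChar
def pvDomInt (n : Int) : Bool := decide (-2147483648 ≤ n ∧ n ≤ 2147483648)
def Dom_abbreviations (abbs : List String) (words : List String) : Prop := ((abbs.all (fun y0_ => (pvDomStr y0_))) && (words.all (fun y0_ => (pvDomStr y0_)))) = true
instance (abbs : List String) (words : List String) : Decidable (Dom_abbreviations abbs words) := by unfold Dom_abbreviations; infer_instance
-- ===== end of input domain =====

-- B replaces A's per-abbreviation scan over all words by a dictionary, built once, that
-- counts every prefix of every word; each abbreviation becomes one lookup (objective: alternative).


-- ===== PORT A =====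
-- outer loop with early 'return False' → structural recursion on abbs;
-- inner counting loop → foldl over words
def abbreviations : List String → List String → Bool
  | [], _ => true
  | abb :: rest, words =>
    let count : Int :=
      words.foldl (fun c word => if PySem.Str.startswith word abb then c + 1 else c) 0
    if count ≠ 1 then false else abbreviations rest words

-- ===== PORT B =====
-- counts[word[:i]] += 1 for each word and each i in range(1, len(word)+1)
def pvPrefixCounts (words : List String) : PySem.Dict String Int :=
  words.foldl
    (fun d word =>
      (PySem.List.pyRange 1 (PySem.Str.len word + 1)).foldl
        (fun d i =>
          let p := PySem.Str.slice word none (some i)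
          d.insert p (d.getD p 0 + 1))
        d)
    PySem.Dict.empty

def abbreviations_alt (abbs : List String) (words : List String) : Bool :=
  let counts := pvPrefixCounts words
  let counts := counts.insert "" (words.length : Int)
  abbs.all (fun a => counts.getD a 0 == 1)

-- ===== PRECONDITION & SPEC =====
def Spec_abbreviations (abbs : List String) (words : List String) (out : Bool) : Prop := out = abbreviations_alt abbs words
instance (abbs : List String) (words : List String) (out : Bool) : Decidable (Spec_abbreviations abbs words out) := by unfold Spec_abbreviations; infer_instance

-- ===== CLAIM (what is proved, stated in full; the proofs are below) =====
def Claim_equal_abbreviations : Prop := ∀ (abbs : List String) (words : List String), Dom_abbreviations abbs words → Spec_abbreviations abbs words (abbreviations abbs words)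

-- ===== LEMMAS AND PROOFS =====

-- the inner loop of B adds 1 to key a exactly when the word starts with a (for a ≠ "")
lemma pvInner_getD (d : PySem.Dict String Int) (word a : String) (ha : a ≠ "") :
    ((PySem.List.pyRange 1 (PySem.Str.len word + 1)).foldl
        (fun d i =>
          let p := PySem.Str.slice word none (some i)
          d.insert p (d.getD p 0 + 1))
        d).getD a 0
      = d.getD a 0 + (if PySem.Str.startswith word a then 1 else 0) := by
  have hmap :
      (PySem.List.pyRange 1 (PySem.Str.len word + 1)).foldl
        (fun d i =>
          let p := PySem.Str.slice word none (some i)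
          d.insert p (d.getD p 0 + 1))
        d
      = ((PySem.List.pyRange 1 (PySem.Str.len word + 1)).map
          (fun i => PySem.Str.slice word none (some i))).foldl
          (fun d p => d.insert p (d.getD p 0 + 1)) d := by
    rw [List.foldl_map]
  rw [hmap, PySem.Dict.getD_foldl_insert_add_one]
  congr 1
  -- count of a among the prefixes word[:1], …, word[:len word]
  rw [List.count_eq_countP, List.countP_map]
  have hlen : PySem.Str.len word = (word.toList.length : Int) := by
    simp [PySem.Str.len]
  rw [PySem.List.pyRange_one, List.countP_map]
  have hrange : ((PySem.Str.len word + 1 - 1)).toNat = word.toList.length := by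
    omega
  rw [hrange]
  by_cases hsw : PySem.Str.startswith word a
  · -- predicate holds exactly at the index k with 1 + k = len(a)
    simp only [hsw, if_true]
    have hpre : a.toList <+: word.toList := by
      rw [PySem.Str.startswith_eq, PySem.Chars.startswith_iff] at hsw
      exact hsw
    have hale : a.toList.length ≤ word.toList.length := hpre.length_le
    have hapos : 0 < a.toList.length := by
      cases h : a.toList with
      | nil => exact absurd (by rw [← String.toList_inj, h]; rfl) ha
      | cons x xs => simp
    have heq : ∀ k : Nat, k < word.toList.length →
        (PySem.Str.slice word none (some ((1 : Int) + k)) == a)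
          = (k == a.toList.length - 1) := by
      intro k hklt
      rcases eq_or_ne k (a.toList.length - 1) with hk | hk
      · subst hk
        have h1 : (1 : Int) + (a.toList.length - 1 : Nat) = ((a.toList.length : Nat) : Int) := by
          omega
        have h2 : PySem.Str.slice word none (some ((a.toList.length : Nat) : Int)) = a := by
          rw [← String.toList_inj, PySem.Str.toList_slice,
            PySem.Chars.slice_eq_listSlice, PySem.List.slice_to_natCast]
          exact (List.prefix_iff_eq_take.mp hpre).symm
        rw [h1, h2]
        simp
      · have hne : PySem.Str.slice word none (some ((1 : Int) + k)) ≠ a := by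
          intro hcon
          apply hk
          have := congrArg String.toList hcon
          rw [PySem.Str.toList_slice, PySem.Chars.slice_eq_listSlice] at this
          have h1 : (1 : Int) + (k : Int) = ((k + 1 : Nat) : Int) := by omega
          rw [h1, PySem.List.slice_to_natCast] at this
          have hl := congrArg List.length this
          rw [List.length_take] at hl
          omega
        have hk2 : (k == a.toList.length - 1) = false := by
          simpa using hk
        rw [hk2]
        exact beq_eq_false_iff_ne.mpr hne
    rw [List.countP_congr
      (fun k hk => by
        simp only [Function.comp_apply]
        rw [heq k (List.mem_range.mp hk)])]
    rw [← List.count_eq_countP, List.count_range]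
    have hlt : a.toList.length - 1 < word.toList.length := by omega
    rw [if_pos hlt]
    norm_num
  · -- no index matches: a is not a prefix of word
    simp only [hsw]
    rw [List.countP_eq_zero.mpr]
    · simp
    · intro k hk
      simp only [Function.comp_apply, beq_iff_eq]
      intro hcon
      apply hsw
      rw [PySem.Str.startswith_eq, PySem.Chars.startswith_iff]
      have := congrArg String.toList hcon
      rw [PySem.Str.toList_slice, PySem.Chars.slice_eq_listSlice] at this
      have h1 : (1 : Int) + (k : Int) = ((k + 1 : Nat) : Int) := by omega
      rw [h1, PySem.List.slice_to_natCast] at this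
      rw [← this]
      exact List.take_prefix _ _

-- B's dictionary holds, for every non-empty key a, the number of words starting with a
lemma pvPrefixCounts_getD (words : List String) (a : String) (ha : a ≠ "") :
    (pvPrefixCounts words).getD a 0
      = (words.countP (fun w => PySem.Str.startswith w a) : Int) := by
  unfold pvPrefixCounts
  suffices h : ∀ d : PySem.Dict String Int,
      (words.foldl
        (fun d word =>
          (PySem.List.pyRange 1 (PySem.Str.len word + 1)).foldl
            (fun d i =>
              let p := PySem.Str.slice word none (some i)
              d.insert p (d.getD p 0 + 1))
            d)
        d).getD a 0
      = d.getD a 0 + (words.countP (fun w => PySem.Str.startswith w a) : Int) by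
    rw [h]; simp
  induction words with
  | nil => intro d; simp
  | cons w ws ih =>
    intro d
    rw [List.foldl_cons, ih, pvInner_getD d w a ha, List.countP_cons]
    push_cast
    ring

-- every word starts with the empty abbreviation
lemma pvStartswith_empty (w : String) : PySem.Str.startswith w "" = true := by
  rw [PySem.Str.startswith_eq, PySem.Chars.startswith_iff]
  exact List.nil_prefix

-- A's per-abbreviation count equals B's dictionary lookup, for every key
lemma pvLookup_eq (words : List String) (a : String) :
    ((pvPrefixCounts words).insert "" (words.length : Int)).getD a 0
      = (words.countP (fun w => PySem.Str.startswith w a) : Int) := by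
  rw [PySem.Dict.getD_insert]
  by_cases h : a = ""
  · subst h
    have hc : words.countP (fun w => PySem.Chars.startswith w.toList []) = words.length := by
      rw [List.countP_eq_length]
      intro w _
      simpa [PySem.Str.startswith_eq] using pvStartswith_empty w
    simp [hc]
  · rw [if_neg h, pvPrefixCounts_getD words a h]

-- ===== VERDICT (by name: the statement is the Claim_ definition above) =====
theorem abbreviations_spec : Claim_equal_abbreviations := by
  intro abbs words hdom
  unfold Spec_abbreviations
  clear hdom
  induction abbs with
  | nil => simp [abbreviations, abbreviations_alt]
  | cons a rest ih =>
    have halt : abbreviations_alt (a :: rest) words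
        = ((((pvPrefixCounts words).insert "" (words.length : Int)).getD a 0 == 1)
            && abbreviations_alt rest words) := by
      simp [abbreviations_alt]
    rw [halt, pvLookup_eq]
    simp only [abbreviations, PySem.List.foldl_if_add_one, zero_add]
    rw [ih]
    by_cases h : List.countP (fun x => PySem.Chars.startswith x.toList a.toList) words = 1
    · simp [h]
    · simp [h, Nat.cast_eq_one]
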